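-- pv_equiv track=rewrite | github.com/SidneyGomes/CG-Project | OpenImage/filtros.py | prewitt
-- ===== SOURCE A (Python) =====
-- def prewitt(multiplica_matriz):
--
--     mascara_x = [[-1, -1, -1], [0, 0, 0], [1, 1, 1]]
--     mascara_y = [[-1, 0, 1], [-1, 0, 1], [-1, 0, 1]]
--
--
--     soma_x = 0
--     soma_y = 0
--     for k in range(len(mascara_x)):
--         for l in range(len(mascara_x)):
--             soma_x += (multiplica_matriz[k][l] * mascara_x[k][l])
--             soma_y += (multiplica_matriz[k][l] * mascara_y[k][l])
--
--
--     magnitude = soma_x + soma_y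
--
--     if magnitude > 255:
--         magnitude = 255
--     elif magnitude < 0:
--         magnitude = 0
--
--     return magnitude
-- ===== SOURCE B (Python) =====
-- def prewitt(multiplica_matriz):
--     r0 = multiplica_matriz[0]
--     r1 = multiplica_matriz[1]
--     r2 = multiplica_matriz[2]
--     soma_x = (r2[0] + r2[1] + r2[2]) - (r0[0] + r0[1] + r0[2])
--     soma_y = (r0[2] - r0[0]) + (r1[2] - r1[0]) + (r2[2] - r2[0])
--     return max(0, min(255, soma_x + soma_y))
-- ===== Notes on version B (the rewrite author's own statement) =====
-- stated objective: simpler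
-- what changed: Replaces the two 3x3 mask tables and the nested double loop with a direct closed-form expression over the nine 3x3 entries (the zero-coefficient cells disappear) and a max/min clamp.
-- outside the precondition, e.g. on prewitt([[1, 2], [3, 4]]): A raises IndexError, B raises IndexError
import Mathlib
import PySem

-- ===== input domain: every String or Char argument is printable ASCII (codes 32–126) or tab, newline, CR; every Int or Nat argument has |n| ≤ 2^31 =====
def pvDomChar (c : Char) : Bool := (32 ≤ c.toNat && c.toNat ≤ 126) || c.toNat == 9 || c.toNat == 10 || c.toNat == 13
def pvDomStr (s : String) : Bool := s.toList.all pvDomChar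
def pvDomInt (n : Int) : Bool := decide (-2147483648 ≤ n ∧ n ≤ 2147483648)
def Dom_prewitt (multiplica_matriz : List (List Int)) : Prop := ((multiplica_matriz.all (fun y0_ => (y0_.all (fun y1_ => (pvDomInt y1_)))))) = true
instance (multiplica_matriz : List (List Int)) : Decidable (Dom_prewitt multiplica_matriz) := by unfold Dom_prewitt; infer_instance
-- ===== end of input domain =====

-- ===== PORT A =====
-- Header: B replaces the mask tables and nested loops by a closed-form expression over the 3x3 entries (objective: simpler).
def prewitt (multiplica_matriz : List (List Int)) : Int :=
  let mascara_x : List (List Int) := [[-1, -1, -1], [0, 0, 0], [1, 1, 1]]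
  let mascara_y : List (List Int) := [[-1, 0, 1], [-1, 0, 1], [-1, 0, 1]]
  let s := (PySem.List.pyRange 0 (mascara_x.length) 1).foldl (fun (s : Int × Int) k =>
    (PySem.List.pyRange 0 (mascara_x.length) 1).foldl (fun (s : Int × Int) l =>
      let v := (PySem.List.pyGet? ((PySem.List.pyGet? multiplica_matriz k).getD []) l).getD 0
      let mx := (PySem.List.pyGet? ((PySem.List.pyGet? mascara_x k).getD []) l).getD 0
      let my := (PySem.List.pyGet? ((PySem.List.pyGet? mascara_y k).getD []) l).getD 0
      (s.1 + v * mx, s.2 + v * my)) s) (0, 0)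
  let magnitude := s.1 + s.2
  if magnitude > 255 then 255 else if magnitude < 0 then 0 else magnitude

-- ===== PORT B =====
def prewitt_alt (multiplica_matriz : List (List Int)) : Int :=
  let r0 := (PySem.List.pyGet? multiplica_matriz 0).getD []
  let r1 := (PySem.List.pyGet? multiplica_matriz 1).getD []
  let r2 := (PySem.List.pyGet? multiplica_matriz 2).getD []
  let g := fun (r : List Int) (j : Int) => (PySem.List.pyGet? r j).getD 0
  let soma_x := (g r2 0 + g r2 1 + g r2 2) - (g r0 0 + g r0 1 + g r0 2)
  let soma_y := (g r0 2 - g r0 0) + (g r1 2 - g r1 0) + (g r2 2 - g r2 0)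
  max 0 (min 255 (soma_x + soma_y))

-- ===== PRECONDITION & SPEC =====
-- Pre_: A (and B) index rows 0..2 and columns 0..2; anything smaller raises IndexError in both.
def Pre_prewitt (multiplica_matriz : List (List Int)) : Prop :=
  3 ≤ multiplica_matriz.length ∧ ∀ r ∈ multiplica_matriz.take 3, 3 ≤ r.length
instance (multiplica_matriz : List (List Int)) : Decidable (Pre_prewitt multiplica_matriz) := by
  unfold Pre_prewitt; infer_instance
def pvWitness_prewitt : List (List Int) := [[1, 2, 3], [4, 5, 6], [7, 8, 9]]
def Spec_prewitt (multiplica_matriz : List (List Int)) (out : Int) : Prop := out = prewitt_alt multiplica_matriz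
instance (multiplica_matriz : List (List Int)) (out : Int) : Decidable (Spec_prewitt multiplica_matriz out) := by unfold Spec_prewitt; infer_instance

-- ===== CLAIM (what is proved, stated in full; the proofs are below) =====
def Claim_equal_prewitt : Prop := ∀ (multiplica_matriz : List (List Int)), Dom_prewitt multiplica_matriz → Pre_prewitt multiplica_matriz → Spec_prewitt multiplica_matriz (prewitt multiplica_matriz)

-- ===== LEMMAS AND PROOFS =====
theorem pg0 {α : Type} (x : α) (xs : List α) : PySem.List.pyGet? (x :: xs) 0 = some x := by
  simp only [PySem.List.pyGet?, PySem.List.pyIdx?]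
  rw [if_pos (by positivity)]; simp
theorem pg1 {α : Type} (x y : α) (xs : List α) : PySem.List.pyGet? (x :: y :: xs) 1 = some y := by
  simp only [PySem.List.pyGet?, PySem.List.pyIdx?]
  rw [if_pos (by omega)]; simp
theorem pg2 {α : Type} (x y z : α) (xs : List α) : PySem.List.pyGet? (x :: y :: z :: xs) 2 = some z := by
  simp only [PySem.List.pyGet?, PySem.List.pyIdx?]
  rw [if_pos (by norm_num), if_pos (by simp only [List.length_cons]; push_cast; omega)]
  rfl

-- ===== VERDICT (by name: the statement is the Claim_ definition above) =====
theorem prewitt_spec : Claim_equal_prewitt := by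
  intro m _ hpre
  obtain ⟨hlen, hrows⟩ := hpre
  match m, hlen with
  | r0 :: r1 :: r2 :: rest, _ =>
    have h0 : 3 ≤ r0.length := hrows r0 (by simp)
    have h1 : 3 ≤ r1.length := hrows r1 (by simp)
    have h2 : 3 ≤ r2.length := hrows r2 (by simp)
    match r0, h0 with
    | a0 :: a1 :: a2 :: _, _ =>
      match r1, h1 with
      | b0 :: b1 :: b2 :: _, _ =>
        match r2, h2 with
        | c0 :: c1 :: c2 :: _, _ =>
          have hr : PySem.List.pyRange 0 3 1 = [0, 1, 2] := by decide
          have ht : Int.toNat 2 = 2 := rfl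
          simp only [Spec_prewitt, prewitt, prewitt_alt, List.length_cons, List.length_nil]
          norm_num [hr, List.foldl, pg0, pg1, pg2, ht]
          omega
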